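-- pv_equiv track=rewrite | github.com/jeemyeong/problem-solving | boj-3090-1.py | solve
-- ===== SOURCE A (Python) =====
-- def solve(N, T, number_array):
--     for _ in range(T):
--         max_difference = 0
--         max_difference_pair = None
--         for i in range(1, N):
--             if abs(number_array[i] - number_array[i-1]) > max_difference:
--                 max_difference = abs(number_array[i] - number_array[i-1])
--                 max_difference_pair = (i-1, i)
--
--         i = max_difference_pair[1]
--         if number_array[i-1] > number_array[i]:
--             number_array[i-1] -= 1
--         else:
--             number_array[i] -= 1
--     return number_array
-- ===== SOURCE B (Python) =====
-- def solve(N, T, number_array):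
--     # sqrt-decomposition over the adjacent-difference array: each of the T steps
--     # finds the leftmost max |difference| by scanning block maxima + one block,
--     # and patches d and the touched block maxima in O(sqrt(N)) instead of
--     # rescanning all N values.  Mutates number_array in place, like A.
--     if T > 0:
--         n = N - 1
--         d = [number_array[k + 1] - number_array[k] for k in range(n)]
--         w = 1
--         while w * w < n:
--             w += 1
--         nb = (n + w - 1) // w
--         bm = []
--         for b in range(nb):
--             m = 0
--             for k in range(b * w, min(b * w + w, n)):
--                 if abs(d[k]) > m:
--                     m = abs(d[k])
--             bm.append(m)
--         for _ in range(T):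
--             best = 0
--             bb = 0
--             for b in range(nb):
--                 if bm[b] > best:
--                     best = bm[b]
--                     bb = b
--             j = bb * w
--             while abs(d[j]) != best:
--                 j += 1
--             touched = [j // w]
--             if d[j] < 0:
--                 number_array[j] -= 1
--                 d[j] += 1
--                 if j > 0:
--                     d[j - 1] -= 1
--                     if (j - 1) // w != j // w:
--                         touched.append((j - 1) // w)
--             else:
--                 number_array[j + 1] -= 1
--                 d[j] -= 1
--                 if j + 1 < n:
--                     d[j + 1] += 1
--                     if (j + 1) // w != j // w:
--                         touched.append((j + 1) // w)
--             for b in touched: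
--                 m = 0
--                 for k in range(b * w, min(b * w + w, n)):
--                     if abs(d[k]) > m:
--                         m = abs(d[k])
--                 bm[b] = m
--     return number_array
-- ===== Notes on version B (the rewrite author's own statement) =====
-- stated objective: faster
-- what changed: B replaces A's full O(N) rescan of the value array at every step by a sqrt-decomposition over the adjacent-difference array: block maxima are built once, each of the T steps finds the leftmost maximum |difference| by scanning the O(sqrt(N)) block maxima plus one block, and patches the at most 2 changed differences and their 1-2 block maxima.
import Mathlib
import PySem

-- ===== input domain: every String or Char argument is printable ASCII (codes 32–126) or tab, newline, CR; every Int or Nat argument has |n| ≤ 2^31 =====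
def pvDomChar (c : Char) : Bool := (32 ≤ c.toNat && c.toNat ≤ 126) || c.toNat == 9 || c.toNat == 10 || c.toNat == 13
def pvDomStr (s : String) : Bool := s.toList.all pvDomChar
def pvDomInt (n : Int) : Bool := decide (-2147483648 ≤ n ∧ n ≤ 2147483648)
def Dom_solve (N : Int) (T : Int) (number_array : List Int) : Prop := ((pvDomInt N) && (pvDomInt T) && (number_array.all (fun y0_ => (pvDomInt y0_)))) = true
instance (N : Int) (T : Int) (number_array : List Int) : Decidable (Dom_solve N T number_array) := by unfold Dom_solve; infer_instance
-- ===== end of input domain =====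

-- B replaces A's per-step O(N) rescan of the value array by a sqrt-decomposition over the
-- adjacent-difference array (block maxima, O(sqrt N) query + O(sqrt N) patch per step).
-- Both A and B mutate number_array in place in Python; the equivalence proved here is about
-- the RETURN value (the ports are pure).

-- ===== PORT A =====
def scanA (N : Int) (arr : List Int) : Int × Option (Int × Int) :=
  (PySem.List.pyRange 1 N 1).foldl
    (fun st i =>
      if |PySem.List.pyGetD arr i 0 - PySem.List.pyGetD arr (i-1) 0| > st.1
      then (|PySem.List.pyGetD arr i 0 - PySem.List.pyGetD arr (i-1) 0|, some ((i-1, i) : Int × Int))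
      else st)
    (0, none)

def stepA (N : Int) (arr : List Int) : List Int :=
  match (scanA N arr).2 with
  | none => arr
  | some p =>
    let i := p.2
    if PySem.List.pyGetD arr (i-1) 0 > PySem.List.pyGetD arr i 0
    then PySem.List.pySetD arr (i-1) (PySem.List.pyGetD arr (i-1) 0 - 1)
    else PySem.List.pySetD arr i (PySem.List.pyGetD arr i 0 - 1)

def solve (N : Int) (T : Int) (number_array : List Int) : List Int :=
  (PySem.List.pyRange 0 T 1).foldl (fun a _ => stepA N a) number_array

-- ===== PORT B =====
-- inner loop of Source B computing a block maximum of |d| over d[b*w : min(b*w+w, n)]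
def blockMaxB (d : List Int) (n : Int) (w : Int) (b : Int) : Int :=
  (PySem.List.pyRange (b*w) (min (b*w + w) n) 1).foldl
    (fun m k => if |PySem.List.pyGetD d k 0| > m then |PySem.List.pyGetD d k 0| else m) 0

-- Source B's `while w * w < n: w += 1`
def wloopB (n : Int) (w : Int) : Int :=
  if h : w * w < n then wloopB n (w + 1) else w
  termination_by (n - w).toNat
  decreasing_by
    have h0 : 0 ≤ w * w := mul_self_nonneg w
    have : w < n := by nlinarith
    omega

-- Source B's `while abs(d[j]) != best: j += 1` (the range guard only makes the recursion total;
-- Source B raises IndexError past the end, which is unreachable under Pre_solve)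
def findjB (d : List Int) (best : Int) (j : Int) : Int :=
  if h : 0 ≤ j ∧ j < (d.length : Int) then
    if |PySem.List.pyGetD d j 0| ≠ best then findjB d best (j + 1) else j
  else j
  termination_by ((d.length : Int) - j).toNat
  decreasing_by omega

def stepB (n : Int) (w : Int) (nb : Int) (st : List Int × List Int × List Int) :
    List Int × List Int × List Int :=
  let arr := st.1
  let d := st.2.1
  let bm := st.2.2
  let q := (PySem.List.pyRange 0 nb 1).foldl
      (fun p b => if PySem.List.pyGetD bm b 0 > p.1 then (PySem.List.pyGetD bm b 0, b) else p)
      ((0 : Int), (0 : Int))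
  let j := findjB d q.1 (q.2 * w)
  let jb := PySem.Int.floordiv j w
  if PySem.List.pyGetD d j 0 < 0 then
    let arr' := PySem.List.pySetD arr j (PySem.List.pyGetD arr j 0 - 1)
    let d1 := PySem.List.pySetD d j (PySem.List.pyGetD d j 0 + 1)
    let dt : List Int × List Int :=
      if j > 0 then
        (PySem.List.pySetD d1 (j-1) (PySem.List.pyGetD d1 (j-1) 0 - 1),
         if PySem.Int.floordiv (j-1) w ≠ jb then [jb, PySem.Int.floordiv (j-1) w] else [jb])
      else (d1, [jb])
    (arr', dt.1, dt.2.foldl (fun bm' b => PySem.List.pySetD bm' b (blockMaxB dt.1 n w b)) bm)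
  else
    let arr' := PySem.List.pySetD arr (j+1) (PySem.List.pyGetD arr (j+1) 0 - 1)
    let d1 := PySem.List.pySetD d j (PySem.List.pyGetD d j 0 - 1)
    let dt : List Int × List Int :=
      if j + 1 < n then
        (PySem.List.pySetD d1 (j+1) (PySem.List.pyGetD d1 (j+1) 0 + 1),
         if PySem.Int.floordiv (j+1) w ≠ jb then [jb, PySem.Int.floordiv (j+1) w] else [jb])
      else (d1, [jb])
    (arr', dt.1, dt.2.foldl (fun bm' b => PySem.List.pySetD bm' b (blockMaxB dt.1 n w b)) bm)

def solve_alt (N : Int) (T : Int) (number_array : List Int) : List Int :=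
  if T > 0 then
    let n := N - 1
    let d := (PySem.List.pyRange 0 n 1).map
      (fun k => PySem.List.pyGetD number_array (k+1) 0 - PySem.List.pyGetD number_array k 0)
    let w := wloopB n 1
    let nb := PySem.Int.floordiv (n + w - 1) w
    let bm := (PySem.List.pyRange 0 nb 1).map (fun b => blockMaxB d n w b)
    ((PySem.List.pyRange 0 T 1).foldl (fun st _ => stepB n w nb st) (number_array, d, bm)).1
  else number_array

-- ===== PRECONDITION & SPEC =====
-- Pre_solve holds EXACTLY on the inputs where Python A returns normally: with T >= 1 steps,
-- A raises IndexError unless 2 <= N <= len(number_array), and each step decrements one of the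
-- first N entries by 1 (never below their minimum, which stays attained), so after
-- sum(first N) - N*min(first N) steps the first N entries are all equal, the scan finds no
-- pair with positive difference and A raises TypeError (None subscripted).
def Pre_solve (N : Int) (T : Int) (number_array : List Int) : Prop :=
  T ≤ 0 ∨ (2 ≤ N ∧ N ≤ (number_array.length : Int) ∧
    T ≤ (number_array.take N.toNat).sum - N * ((number_array.take N.toNat).min?.getD 0))
instance (N : Int) (T : Int) (number_array : List Int) : Decidable (Pre_solve N T number_array) := by
  unfold Pre_solve; infer_instance

def pvWitness_solve : Int × Int × List Int := (3, 2, [5, 1, 2])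

def Spec_solve (N : Int) (T : Int) (number_array : List Int) (out : List Int) : Prop :=
  out = solve_alt N T number_array
instance (N : Int) (T : Int) (number_array : List Int) (out : List Int) :
    Decidable (Spec_solve N T number_array out) := by unfold Spec_solve; infer_instance

-- ===== CLAIM =====
def Claim_equal_solve : Prop := ∀ (N : Int) (T : Int) (number_array : List Int),
  Dom_solve N T number_array → Pre_solve N T number_array →
  Spec_solve N T number_array (solve N T number_array)

-- ===== LEMMAS AND PROOFS =====

def diffs (N : Int) (arr : List Int) : List Int :=
  (PySem.List.pyRange 1 N 1).map
    (fun i => PySem.List.pyGetD arr i 0 - PySem.List.pyGetD arr (i-1) 0)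

lemma ext_getD (xs ys : List Int) (hlen : xs.length = ys.length)
    (h : ∀ k, k < xs.length → xs.getD k 0 = ys.getD k 0) : xs = ys := by
  apply List.ext_getElem hlen
  intro k h1 h2
  have := h k h1
  rwa [List.getD_eq_getElem _ _ h1, List.getD_eq_getElem _ _ h2] at this

lemma getD_set (xs : List Int) (n : Nat) (v : Int) (k : Nat) (hn : n < xs.length) :
    (xs.set n v).getD k 0 = if k = n then v else xs.getD k 0 := by
  by_cases hk : k < xs.length
  · rw [List.getD_eq_getElem _ _ (by simpa using hk), List.getElem_set]
    split_ifs with h1 h2 h3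
    · rfl
    · omega
    · omega
    · rw [List.getD_eq_getElem _ _ hk]
  · rw [List.getD_eq_default _ _ (by simpa using hk), List.getD_eq_default _ _ (by omega)]
    rw [if_neg (by omega)]

lemma pyGetD_int (xs : List Int) (j : Int) (h0 : 0 ≤ j) :
    PySem.List.pyGetD xs j 0 = xs.getD j.toNat 0 := by
  have h1 : j = ((j.toNat : Nat) : Int) := by omega
  rw [h1, PySem.List.pyGetD_natCast]
  congr 1

lemma length_diffs (N : Int) (arr : List Int) : (diffs N arr).length = (N-1).toNat := by
  simp [diffs, PySem.List.length_pyRange_one]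

lemma getD_diffs (N : Int) (arr : List Int) (k : Nat) (hk : (k : Int) < N - 1) :
    (diffs N arr).getD k 0
      = PySem.List.pyGetD arr ((k : Int)+1) 0 - PySem.List.pyGetD arr (k : Int) 0 := by
  have := PySem.List.pyGetD_map_pyRange_one
    (fun i => PySem.List.pyGetD arr i 0 - PySem.List.pyGetD arr (i-1) 0) 1 N k 0 (by omega)
  rw [PySem.List.pyGetD_natCast] at this
  rw [diffs, this]
  norm_num [add_comm]

lemma getD_diffs' (N : Int) (arr : List Int) (k : Nat) (hk : (k : Int) < N - 1) :
    (diffs N arr).getD k 0 = arr.getD (k+1) 0 - arr.getD k 0 := by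
  rw [getD_diffs N arr k hk, pyGetD_int _ _ (by omega), pyGetD_int _ _ (by omega)]
  norm_num

-- running maximum (with 0) of the first n values of v, and derived maxima over a diff list
def mxr (v : Nat → Int) (n : Nat) : Int := (List.range n).foldl (fun m k => max m (v k)) 0

def mxd (d : List Int) : Int := mxr (fun k => |d.getD k 0|) d.length

def segMx (d : List Int) (w b : Nat) : Int :=
  mxr (fun k => |d.getD (b*w+k) 0|) (min w (d.length - b*w))

def bmList (d : List Int) (w nb : Nat) : List Int := (List.range nb).map (fun b => segMx d w b)

lemma mxr_succ (v : Nat → Int) (n : Nat) : mxr v (n+1) = max (mxr v n) (v n) := by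
  rw [mxr, mxr, List.range_succ, List.foldl_append]
  rfl

lemma mxr_nonneg (v : Nat → Int) (n : Nat) : 0 ≤ mxr v n := by
  induction n with
  | zero => simp [mxr]
  | succ n ih => rw [mxr_succ]; exact le_trans ih (le_max_left _ _)

lemma le_mxr (v : Nat → Int) (n : Nat) (k : Nat) (hk : k < n) : v k ≤ mxr v n := by
  induction n with
  | zero => omega
  | succ n ih =>
      rw [mxr_succ]
      by_cases h : k = n
      · rw [h]; exact le_max_right _ _
      · exact le_trans (ih (by omega)) (le_max_left _ _)

lemma mxr_le (v : Nat → Int) (n : Nat) (c : Int) (hc : 0 ≤ c)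
    (h : ∀ k, k < n → v k ≤ c) : mxr v n ≤ c := by
  induction n with
  | zero => simpa [mxr]
  | succ n ih =>
      rw [mxr_succ]
      exact max_le (ih (fun k hk => h k (by omega))) (h n (by omega))

lemma mxr_congr (v v' : Nat → Int) (n : Nat) (h : ∀ k, k < n → v k = v' k) :
    mxr v n = mxr v' n := by
  induction n with
  | zero => rfl
  | succ n ih =>
      rw [mxr_succ, mxr_succ, ih (fun k hk => h k (by omega)), h n (by omega)]

-- characterisation of the strict-greater "leftmost argmax" fold both scans use
lemma gfold_char {g : Type} (v : Nat → Int) (gf : Nat → g) (d0 : g) (n : Nat) :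
    ((List.range n).foldl (fun st k => if v k > st.1 then (v k, gf k) else st) ((0:Int), d0)).1
      = mxr v n
  ∧ (mxr v n = 0 → (List.range n).foldl (fun st k => if v k > st.1 then (v k, gf k) else st) ((0:Int), d0) = (0, d0))
  ∧ (0 < mxr v n → ∃ i : Nat, i < n ∧ v i = mxr v n ∧ (∀ k, k < i → v k < mxr v n) ∧
      (List.range n).foldl (fun st k => if v k > st.1 then (v k, gf k) else st) ((0:Int), d0) = (mxr v n, gf i)) := by
  induction n with
  | zero =>
      refine ⟨rfl, fun _ => rfl, fun h => absurd h (by simp [mxr])⟩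
  | succ n ih =>
      obtain ⟨ih1, ih2, ih3⟩ := ih
      have hstep : (List.range (n+1)).foldl (fun st k => if v k > st.1 then (v k, gf k) else st) ((0:Int), d0)
          = (if v n > ((List.range n).foldl (fun st k => if v k > st.1 then (v k, gf k) else st) ((0:Int), d0)).1
             then (v n, gf n)
             else (List.range n).foldl (fun st k => if v k > st.1 then (v k, gf k) else st) ((0:Int), d0)) := by
        rw [List.range_succ, List.foldl_append]
        simp only [List.foldl_cons, List.foldl_nil]
      rw [hstep, ih1, mxr_succ]
      by_cases hc : v n > mxr v n
      · rw [if_pos hc]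
        refine ⟨(max_eq_right (le_of_lt hc)).symm, ?_, ?_⟩
        · intro h0
          have := mxr_nonneg v n
          omega
        · intro _
          refine ⟨n, by omega, (max_eq_right (le_of_lt hc)).symm, ?_, ?_⟩
          · intro k hk
            calc v k ≤ mxr v n := le_mxr v n k hk
            _ < v n := hc
            _ ≤ max (mxr v n) (v n) := le_max_right _ _
          · rw [max_eq_right (le_of_lt hc)]
      · rw [if_neg hc]
        have hmax : max (mxr v n) (v n) = mxr v n := max_eq_left (by omega)
        rw [hmax]
        refine ⟨ih1, ?_, ?_⟩
        · intro h0; exact ih2 h0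
        · intro hpos
          obtain ⟨i, hi1, hi2, hi3, hi4⟩ := ih3 hpos
          exact ⟨i, by omega, hi2, hi3, hi4⟩

lemma scanA_eq_gfold (N : Int) (arr : List Int) :
    scanA N arr = (List.range (N-1).toNat).foldl
      (fun st k => if |(diffs N arr).getD k 0| > st.1
        then (|(diffs N arr).getD k 0|, some (((k:Int), (k:Int)+1) : Int × Int)) else st)
      ((0:Int), none) := by
  rw [scanA, PySem.List.pyRange_one, List.foldl_map]
  apply PySem.List.foldl_congr_mem'
  intro k hk acc
  have hk' : (k:Int) < N - 1 := by
    have := List.mem_range.mp hk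
    omega
  have h1 : (1:Int) + (k:Int) - 1 = (k:Int) := by ring
  have h2 : (1:Int) + (k:Int) = (k:Int) + 1 := by ring
  rw [h1, h2, ← getD_diffs N arr k hk']

lemma scanA_char_pos (N : Int) (arr : List Int) (hpos : 0 < mxd (diffs N arr)) :
    ∃ i : Nat, i < (N-1).toNat ∧ |(diffs N arr).getD i 0| = mxd (diffs N arr) ∧
      (∀ k, k < i → |(diffs N arr).getD k 0| < mxd (diffs N arr)) ∧
      scanA N arr = (mxd (diffs N arr), some ((i:Int), (i:Int)+1)) := by
  have hmx : mxr (fun k => |(diffs N arr).getD k 0|) (N-1).toNat = mxd (diffs N arr) := by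
    rw [mxd, length_diffs]
  obtain ⟨-, -, h3⟩ := gfold_char (fun k => |(diffs N arr).getD k 0|)
    (fun k => some (((k:Int), (k:Int)+1) : Int × Int)) none (N-1).toNat
  obtain ⟨i, hi1, hi2, hi3, hi4⟩ := h3 (by rw [hmx]; exact hpos)
  refine ⟨i, hi1, by rw [← hmx]; exact hi2, fun k hk => by rw [← hmx]; exact hi3 k hk, ?_⟩
  rw [scanA_eq_gfold, hi4, hmx]

lemma if_abs_max (m x : Int) : (if |x| > m then |x| else m) = max m |x| := by
  by_cases h : |x| > m
  · rw [if_pos h, max_eq_right (le_of_lt h)]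
  · rw [if_neg h, max_eq_left (by omega)]

lemma blockMaxB_eq_segMx (d : List Int) (w b : Nat) :
    blockMaxB d ((d.length : Nat) : Int) ((w : Nat) : Int) ((b : Nat) : Int) = segMx d w b := by
  rw [blockMaxB, PySem.List.pyRange_one, List.foldl_map, segMx, mxr]
  have hs : ((b:Int)) * ((w:Int)) = (((b*w : Nat) : Nat) : Int) := by push_cast; ring
  have hcount : ((min ((b:Int)*(w:Int) + (w:Int)) ((d.length : Nat):Int)) - (b:Int)*(w:Int)).toNat
      = min w (d.length - b*w) := by
    rw [hs]
    generalize (b*w : Nat) = s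
    omega
  rw [hcount]
  apply PySem.List.foldl_congr_mem'
  intro k hk acc
  have hk' : k < min w (d.length - b*w) := List.mem_range.mp hk
  have hidx : (b:Int)*(w:Int) + (k:Int) = (((b*w + k : Nat) : Nat) : Int) := by push_cast; ring
  rw [hidx, PySem.List.pyGetD_natCast, if_abs_max]

lemma segMx_le_mxd (d : List Int) (w b : Nat) : segMx d w b ≤ mxd d := by
  apply mxr_le _ _ _ (mxr_nonneg _ _)
  intro k hk
  have hlt : b*w + k < d.length := by omega
  exact le_mxr _ _ _ hlt

lemma abs_le_segMx (d : List Int) (w : Nat) (hw : 0 < w) (j : Nat) (hj : j < d.length) :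
    |d.getD j 0| ≤ segMx d w (j / w) := by
  have hdm : (j/w)*w + j % w = j := by
    rw [mul_comm]
    exact Nat.div_add_mod j w
  have h1 : j % w < min w (d.length - (j/w)*w) := by
    have := Nat.mod_lt j hw
    omega
  have := le_mxr (fun k => |d.getD ((j/w)*w + k) 0|) (min w (d.length - (j/w)*w)) (j % w) h1
  rw [segMx]
  simpa [hdm] using this

lemma mx_blocks (d : List Int) (w nb : Nat) (hw : 0 < w) (hcov : d.length ≤ nb * w) :
    mxr (fun b => segMx d w b) nb = mxd d := by
  apply le_antisymm
  · exact mxr_le _ _ _ (mxr_nonneg _ _) (fun b _ => segMx_le_mxd d w b)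
  · apply mxr_le _ _ _ (mxr_nonneg _ _)
    intro j hj
    have hb : j / w < nb := (Nat.div_lt_iff_lt_mul hw).mpr (by omega)
    exact le_trans (abs_le_segMx d w hw j hj) (le_mxr _ _ _ hb)

lemma findj_eq (d : List Int) (best : Int) : ∀ (m : Nat) (j0 : Nat) (i : Nat), i - j0 = m →
    j0 ≤ i → i < d.length → |d.getD i 0| = best →
    (∀ k, j0 ≤ k → k < i → |d.getD k 0| ≠ best) →
    findjB d best ((j0 : Nat) : Int) = ((i : Nat) : Int) := by
  intro m
  induction m with
  | zero =>
      intro j0 i hm hij hilen hi _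
      have he : j0 = i := by omega
      rw [findjB, dif_pos (by constructor <;> [omega; exact_mod_cast (by omega : (j0:Int) < d.length)])]
      rw [PySem.List.pyGetD_natCast, he, if_neg (by rw [hi]; simp)]
  | succ m ih =>
      intro j0 i hm hij hilen hi hmin
      have hjlen : j0 < d.length := by omega
      rw [findjB, dif_pos (by constructor <;> [omega; exact_mod_cast (by omega : (j0:Int) < d.length)])]
      rw [PySem.List.pyGetD_natCast,
        if_pos (by exact hmin j0 (le_refl _) (by omega)),
        show ((j0:Nat):Int) + 1 = (((j0+1 : Nat) : Nat) : Int) by push_cast; ring]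
      exact ih (j0+1) i (by omega) (by omega) hilen hi (fun k hk1 hk2 => hmin k (by omega) hk2)

def sumN (N : Int) (arr : List Int) : Int := (arr.take N.toNat).sum

lemma sum_set' (l : List Int) : ∀ (p : Nat) (v : Int), p < l.length →
    (l.set p v).sum = l.sum - l.getD p 0 + v := by
  induction l with
  | nil => intro p v hp; simp at hp
  | cons a as ih =>
      intro p v hp
      cases p with
      | zero => simp [List.set]; ring
      | succ p =>
          have := ih p v (by simpa using hp)
          simp [List.set, this]
          ring

lemma getD_take (arr : List Int) (t k : Nat) (hk : k < t) :
    (arr.take t).getD k 0 = arr.getD k 0 := by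
  by_cases hl : k < arr.length
  · rw [List.getD_eq_getElem _ _ (by simp; omega), List.getD_eq_getElem _ _ hl]
    simp [List.getElem_take]
  · rw [List.getD_eq_default _ _ (by simp; omega), List.getD_eq_default _ _ (by omega)]

lemma take_set_comm (l : List Int) : ∀ (p t : Nat) (v : Int),
    (l.set p v).take t = (l.take t).set p v := by
  induction l with
  | nil => intro p t v; simp
  | cons a as ih =>
      intro p t v
      cases p with
      | zero => cases t <;> simp [List.set]
      | succ p =>
          cases t with
          | zero => simp [List.set]
          | succ t => simp [List.set, ih p t v]

lemma sum_take_set (arr : List Int) (p t : Nat) (v : Int) (hp : p < t) (hplen : p < arr.length)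
    (ht : t ≤ arr.length) :
    ((arr.set p v).take t).sum = (arr.take t).sum - arr.getD p 0 + v := by
  rw [take_set_comm, sum_set' _ p v (by simp; omega), getD_take arr t p hp]

lemma sum_take_const (arr : List Int) (t : Nat) (m0 : Int) (ht : t ≤ arr.length)
    (h : ∀ k, k < t → arr.getD k 0 = m0) : (arr.take t).sum = t * m0 := by
  have hrep : arr.take t = List.replicate t m0 := by
    apply List.ext_getElem (by simp; omega)
    intro k h1 h2
    have hk : k < t := by simpa using h2
    rw [List.getElem_replicate, List.getElem_take]
    have := h k hk
    rwa [List.getD_eq_getElem _ _ (by simp at h1; omega)] at this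
  rw [hrep, List.sum_replicate, nsmul_eq_mul]

lemma allEq_of_mxd_zero (N : Int) (arr : List Int) (hz : mxd (diffs N arr) = 0) :
    ∀ k : Nat, (k:Int) < N → arr.getD k 0 = arr.getD 0 0 := by
  intro k
  induction k with
  | zero => intro _; rfl
  | succ k ih =>
      intro hk
      have hk' : k < (diffs N arr).length := by rw [length_diffs]; omega
      have h1 : |(diffs N arr).getD k 0| ≤ mxd (diffs N arr) := by
        rw [mxd]
        exact le_mxr _ _ _ hk'
      have h2 : (diffs N arr).getD k 0 = 0 :=
        abs_eq_zero.mp (le_antisymm (by omega) (abs_nonneg _))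
      rw [getD_diffs' N arr k (by omega)] at h2
      have := ih (by omega)
      omega

-- getD of the fold writing F b into positions b of a list (Source B's touched-blocks loop)
lemma foldl_setF_length (F : Int → Int) : ∀ (tl : List Int) (l0 : List Int),
    (tl.foldl (fun l b => PySem.List.pySetD l b (F b)) l0).length = l0.length := by
  intro tl
  induction tl with
  | nil => intro l0; rfl
  | cons b rest ih =>
      intro l0
      rw [List.foldl_cons, ih, PySem.List.length_pySetD]

lemma foldl_setF_getD (F : Int → Int) : ∀ (tl : List Int) (l0 : List Int),
    (∀ b ∈ tl, ∃ b' : Nat, b = ((b' : Nat) : Int) ∧ b' < l0.length) →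
    ∀ (p : Nat), p < l0.length →
    (tl.foldl (fun l b => PySem.List.pySetD l b (F b)) l0).getD p 0
      = if ((p : Nat) : Int) ∈ tl then F ((p : Nat) : Int) else l0.getD p 0 := by
  intro tl
  induction tl with
  | nil => intro l0 _ p hp; simp
  | cons b rest ih =>
      intro l0 htl p hp
      obtain ⟨b', hb1, hb2⟩ := htl b (by simp)
      rw [List.foldl_cons]
      have hset : PySem.List.pySetD l0 b (F b) = l0.set b' (F b) := by
        rw [hb1, PySem.List.pySetD_natCast]
      have hrec := ih (PySem.List.pySetD l0 b (F b))
        (by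
          intro x hx
          obtain ⟨x', hx1, hx2⟩ := htl x (by simp [hx])
          exact ⟨x', hx1, by rwa [PySem.List.length_pySetD]⟩)
        p (by rwa [PySem.List.length_pySetD])
      rw [hrec, hset, getD_set _ _ _ _ hb2]
      by_cases h1 : ((p : Nat) : Int) ∈ rest
      · rw [if_pos h1, if_pos (by simp [h1])]
      · by_cases h2 : p = b'
        · rw [if_neg h1, if_pos h2, if_pos (show ((p:Nat):Int) ∈ b :: rest by
            rw [hb1, h2]; exact List.mem_cons_self), hb1, h2]
        · rw [if_neg h1, if_neg h2, if_neg (by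
            simp only [List.mem_cons, hb1]
            rintro (hc | hc)
            · exact h2 (by exact_mod_cast hc)
            · exact h1 hc)]

lemma length_bmList (d : List Int) (w nb : Nat) : (bmList d w nb).length = nb := by
  simp [bmList]

lemma bmList_getD (d : List Int) (w nb b : Nat) (hb : b < nb) :
    (bmList d w nb).getD b 0 = segMx d w b := by
  rw [bmList, List.getD_eq_getElem _ _ (by simpa using hb)]
  simp

lemma segMx_congr (dnew dold : List Int) (w b : Nat) (hlen : dnew.length = dold.length)
    (h : ∀ k, k < dold.length → k / w = b → dnew.getD k 0 = dold.getD k 0) :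
    segMx dnew w b = segMx dold w b := by
  rw [segMx, segMx, hlen]
  apply mxr_congr
  intro k hk
  have hw : 0 < w := by omega
  have hkb : (b*w+k) / w = b := by
    rw [add_comm, mul_comm b w, Nat.add_mul_div_left _ _ hw, Nat.div_eq_of_lt (show k < w by omega)]
    omega
  rw [h (b*w+k) (by omega) hkb]

-- the touched-blocks recompute loop restores bm = bmList of the new diff list
lemma bm_update (dnew dold : List Int) (w nb : Nat) (hw : 0 < w)
    (hlen : dnew.length = dold.length)
    (tl : List Int)
    (htl : ∀ b ∈ tl, ∃ b' : Nat, b = ((b' : Nat) : Int) ∧ b' < nb)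
    (hch : ∀ k : Nat, k < dold.length → dnew.getD k 0 ≠ dold.getD k 0 → (((k/w : Nat) : Nat) : Int) ∈ tl) :
    tl.foldl (fun bm' b => PySem.List.pySetD bm' b
        (blockMaxB dnew ((dnew.length : Nat) : Int) ((w : Nat) : Int) b)) (bmList dold w nb)
      = bmList dnew w nb := by
  apply ext_getD
  · rw [foldl_setF_length, length_bmList, length_bmList]
  · intro p hp
    have hpnb : p < nb := by rwa [foldl_setF_length, length_bmList] at hp
    rw [foldl_setF_getD _ tl (bmList dold w nb)
        (by intro b hb; obtain ⟨b', h1, h2⟩ := htl b hb; exact ⟨b', h1, by rwa [length_bmList]⟩)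
        p (by rwa [length_bmList]),
      bmList_getD dnew w nb p hpnb]
    by_cases hmem : ((p : Nat) : Int) ∈ tl
    · rw [if_pos hmem, blockMaxB_eq_segMx]
    · rw [if_neg hmem, bmList_getD dold w nb p hpnb]
      refine (segMx_congr dnew dold w p hlen ?_).symm
      intro k hk hkb
      by_contra hne
      exact hmem (by rw [← hkb]; exact hch k hk hne)

-- diffs of arr.set p v, entrywise
lemma getD_diffs_set (N : Int) (arr : List Int) (p : Nat) (v : Int) (hplen : p < arr.length)
    (k : Nat) (hk : (k:Int) < N - 1) :
    (diffs N (arr.set p v)).getD k 0 =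
      (if k + 1 = p then v - arr.getD k 0
       else if k = p then arr.getD (k+1) 0 - v
       else (diffs N arr).getD k 0) := by
  rw [getD_diffs' N _ k hk, getD_set _ _ _ _ hplen, getD_set _ _ _ _ hplen]
  split_ifs <;> first | rfl | omega | rw [getD_diffs' N arr k hk]

lemma foldl_const_iterate {a b : Type} (f : a → a) : ∀ (l : List b) (x : a),
    l.foldl (fun y _ => f y) x = f^[l.length] x := by
  intro l
  induction l with
  | nil => intro x; rfl
  | cons e rest ih =>
      intro x
      rw [List.foldl_cons, ih, List.length_cons, Function.iterate_succ_apply]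

lemma wloopB_ge (n : Int) : ∀ (m : Nat) (w : Int), (n - w).toNat = m → w ≤ wloopB n w := by
  intro m
  induction m with
  | zero =>
      intro w hm
      rw [wloopB]
      split_ifs with h
      · exfalso
        have hn : n ≤ w := by omega
        nlinarith [mul_self_nonneg w, mul_self_nonneg (w-1)]
      · exact le_refl w
  | succ m ih =>
      intro w hm
      rw [wloopB]
      split_ifs with h
      · have := ih (w+1) (by omega)
        omega
      · exact le_refl w

lemma queryB_char (dd : List Int) (w nb : Int) (hw : 1 ≤ w) (hnb0 : 0 ≤ nb)
    (hcov : dd.length ≤ nb.toNat * w.toNat)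
    (hpos : 0 < mxd dd)
    (i : Nat) (hi : i < dd.length)
    (hiv : |dd.getD i 0| = mxd dd)
    (hileft : ∀ k, k < i → |dd.getD k 0| < mxd dd) :
    ∃ bi : Nat,
      ((PySem.List.pyRange 0 nb 1).foldl
        (fun p b => if PySem.List.pyGetD (bmList dd w.toNat nb.toNat) b 0 > p.1
          then (PySem.List.pyGetD (bmList dd w.toNat nb.toNat) b 0, b) else p)
        ((0:Int), (0:Int))) = (mxd dd, ((bi : Nat) : Int))
      ∧ findjB dd (mxd dd) (((bi : Nat) : Int) * w) = ((i : Nat) : Int) := by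
  have hw' : 0 < w.toNat := by omega
  have hfold : ((PySem.List.pyRange 0 nb 1).foldl
        (fun p b => if PySem.List.pyGetD (bmList dd w.toNat nb.toNat) b 0 > p.1
          then (PySem.List.pyGetD (bmList dd w.toNat nb.toNat) b 0, b) else p)
        ((0:Int), (0:Int)))
      = (List.range nb.toNat).foldl
        (fun st k => if segMx dd w.toNat k > st.1 then (segMx dd w.toNat k, ((0:Int) + (k:Int))) else st)
        ((0:Int), (0:Int)) := by
    rw [PySem.List.pyRange_one, List.foldl_map, show (nb - 0).toNat = nb.toNat by omega]
    apply PySem.List.foldl_congr_mem'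
    intro k hk acc
    have hk' : k < nb.toNat := List.mem_range.mp hk
    rw [show (0:Int) + (k:Int) = ((k:Nat):Int) by ring, PySem.List.pyGetD_natCast,
      bmList_getD dd w.toNat nb.toNat k hk']
  have hM : mxr (fun b => segMx dd w.toNat b) nb.toNat = mxd dd :=
    mx_blocks dd w.toNat nb.toNat hw' hcov
  obtain ⟨-, -, h3⟩ := gfold_char (fun b => segMx dd w.toNat b)
    (fun k => ((0:Int) + (k:Int))) ((0:Int)) nb.toNat
  obtain ⟨bi, hbi1, hbi2, hbi3, hbi4⟩ := h3 (by rw [hM]; exact hpos)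
  rw [hM] at hbi2 hbi3 hbi4
  refine ⟨bi, by rw [hfold, hbi4, zero_add], ?_⟩
  -- the chosen index i lies at or after the start of block bi
  have hge : bi * w.toNat ≤ i := by
    by_contra hlt
    have hdiv : i / w.toNat < bi := (Nat.div_lt_iff_lt_mul hw').mpr (by omega)
    have h1 : |dd.getD i 0| ≤ segMx dd w.toNat (i / w.toNat) := abs_le_segMx dd w.toNat hw' i hi
    have h2 := hbi3 _ hdiv
    omega
  rw [show ((bi:Nat):Int) * w = (((bi * w.toNat : Nat) : Nat):Int) by
    push_cast [Int.toNat_of_nonneg (show (0:Int) ≤ w by omega)]; ring]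
  exact findj_eq dd (mxd dd) (i - bi * w.toNat) (bi * w.toNat) i rfl hge hi hiv
    (fun k hk1 hk2 => by have := hileft k hk2; omega)

lemma d2_eq_left (N : Int) (arr : List Int) (i : Nat) (hlen : N ≤ (arr.length:Int))
    (hi : i < (N-1).toNat) (hi0 : 0 < i) :
    ((diffs N arr).set i ((diffs N arr).getD i 0 + 1)).set (i-1)
        (((diffs N arr).set i ((diffs N arr).getD i 0 + 1)).getD (i-1) 0 - 1)
      = diffs N (arr.set i (arr.getD i 0 - 1)) := by
  have hiL : i < (diffs N arr).length := by rw [length_diffs]; omega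
  have hiL' : i - 1 < ((diffs N arr).set i ((diffs N arr).getD i 0 + 1)).length := by
    rw [List.length_set, length_diffs]; omega
  apply ext_getD
  · rw [List.length_set, List.length_set, length_diffs, length_diffs]
  · intro k hk
    have hk' : k < (N-1).toNat := by
      simpa [List.length_set, length_diffs] using hk
    have hkI : (k:Int) < N - 1 := by omega
    rw [getD_set _ _ _ _ hiL', getD_set _ _ _ _ hiL, getD_set _ _ _ _ hiL,
        getD_diffs_set N arr i (arr.getD i 0 - 1) (by omega) k hkI]
    by_cases e1 : k = i - 1
    · subst e1
      rw [if_pos rfl, if_neg (show ¬ (i-1 = i) by omega), if_pos (show i-1+1 = i by omega),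
          getD_diffs' N arr (i-1) (by omega), show i-1+1 = i from by omega]
      ring
    · rw [if_neg e1]
      by_cases e2 : k = i
      · subst e2
        rw [if_pos rfl, if_neg (show ¬ (k+1 = k) by omega), if_pos rfl,
            getD_diffs' N arr k hkI]
        ring
      · rw [if_neg e2, if_neg (show ¬ (k+1 = i) by omega), if_neg e2]

lemma d1_eq_left0 (N : Int) (arr : List Int) (hlen : N ≤ (arr.length:Int))
    (h0 : 0 < (N-1).toNat) :
    (diffs N arr).set 0 ((diffs N arr).getD 0 0 + 1)
      = diffs N (arr.set 0 (arr.getD 0 0 - 1)) := by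
  have h0L : 0 < (diffs N arr).length := by rw [length_diffs]; omega
  apply ext_getD
  · rw [List.length_set, length_diffs, length_diffs]
  · intro k hk
    have hk' : k < (N-1).toNat := by simpa [List.length_set, length_diffs] using hk
    have hkI : (k:Int) < N - 1 := by omega
    rw [getD_set _ _ _ _ h0L, getD_diffs_set N arr 0 (arr.getD 0 0 - 1) (by omega) k hkI]
    by_cases e2 : k = 0
    · subst e2
      rw [if_pos rfl, if_neg (show ¬ (0+1 = 0) by omega), if_pos rfl,
          getD_diffs' N arr 0 (by omega)]
      ring
    · rw [if_neg e2, if_neg (show ¬ (k+1 = 0) by omega), if_neg e2]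

lemma d2_eq_right (N : Int) (arr : List Int) (i : Nat) (hlen : N ≤ (arr.length:Int))
    (hi : i < (N-1).toNat) (hi1 : i + 1 < (N-1).toNat) :
    ((diffs N arr).set i ((diffs N arr).getD i 0 - 1)).set (i+1)
        (((diffs N arr).set i ((diffs N arr).getD i 0 - 1)).getD (i+1) 0 + 1)
      = diffs N (arr.set (i+1) (arr.getD (i+1) 0 - 1)) := by
  have hiL : i < (diffs N arr).length := by rw [length_diffs]; omega
  have hiL2 : i + 1 < ((diffs N arr).set i ((diffs N arr).getD i 0 - 1)).length := by
    rw [List.length_set, length_diffs]; omega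
  apply ext_getD
  · rw [List.length_set, List.length_set, length_diffs, length_diffs]
  · intro k hk
    have hk' : k < (N-1).toNat := by simpa [List.length_set, length_diffs] using hk
    have hkI : (k:Int) < N - 1 := by omega
    rw [getD_set _ _ _ _ hiL2, getD_set _ _ _ _ hiL, getD_set _ _ _ _ hiL,
        getD_diffs_set N arr (i+1) (arr.getD (i+1) 0 - 1) (by omega) k hkI]
    by_cases e1 : k = i + 1
    · subst e1
      rw [if_pos rfl, if_neg (show ¬ (i+1 = i) by omega), if_neg (show ¬ (i+1+1 = i+1) by omega),
          if_pos rfl, getD_diffs' N arr (i+1) (by omega)]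
      ring
    · rw [if_neg e1]
      by_cases e2 : k = i
      · subst e2
        rw [if_pos rfl, if_pos (show k+1 = k+1 from rfl),
            getD_diffs' N arr k hkI]
        ring
      · rw [if_neg e2, if_neg (show ¬ (k+1 = i+1) by omega), if_neg e1]

lemma d1_eq_rightEnd (N : Int) (arr : List Int) (i : Nat) (hlen : N ≤ (arr.length:Int))
    (hi : i < (N-1).toNat) (hend : ¬ (i + 1 < (N-1).toNat)) :
    (diffs N arr).set i ((diffs N arr).getD i 0 - 1)
      = diffs N (arr.set (i+1) (arr.getD (i+1) 0 - 1)) := by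
  have hiL : i < (diffs N arr).length := by rw [length_diffs]; omega
  apply ext_getD
  · rw [List.length_set, length_diffs, length_diffs]
  · intro k hk
    have hk' : k < (N-1).toNat := by simpa [List.length_set, length_diffs] using hk
    have hkI : (k:Int) < N - 1 := by omega
    rw [getD_set _ _ _ _ hiL,
        getD_diffs_set N arr (i+1) (arr.getD (i+1) 0 - 1) (by omega) k hkI]
    by_cases e2 : k = i
    · subst e2
      rw [if_pos rfl, if_pos (show k+1 = k+1 from rfl), getD_diffs' N arr k hkI]
      ring
    · rw [if_neg e2, if_neg (show ¬ (k+1 = i+1) by omega), if_neg (show ¬ (k = i+1) by omega)]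

lemma step_main (N w nb m0 : Int) (arr : List Int)
    (hN : 2 ≤ N) (hlen : N ≤ (arr.length : Int))
    (hw : 1 ≤ w) (hnb0 : 0 ≤ nb)
    (hcov : (N-1).toNat ≤ nb.toNat * w.toNat)
    (hlow : ∀ k : Nat, (k:Int) < N → m0 ≤ arr.getD k 0)
    (hatt : ∃ k : Nat, (k:Int) < N ∧ arr.getD k 0 = m0)
    (hsum : N * m0 < sumN N arr) :
    stepB (N-1) w nb (arr, diffs N arr, bmList (diffs N arr) w.toNat nb.toNat)
      = (stepA N arr, diffs N (stepA N arr), bmList (diffs N (stepA N arr)) w.toNat nb.toNat)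
    ∧ (stepA N arr).length = arr.length
    ∧ (∀ k : Nat, (k:Int) < N → m0 ≤ (stepA N arr).getD k 0)
    ∧ (∃ k : Nat, (k:Int) < N ∧ (stepA N arr).getD k 0 = m0)
    ∧ sumN N (stepA N arr) = sumN N arr - 1 := by
  have hw' : 0 < w.toNat := by omega
  have hn0 : (diffs N arr).length = (N-1).toNat := length_diffs N arr
  have hpos : 0 < mxd (diffs N arr) := by
    have h0 : 0 ≤ mxd (diffs N arr) := by rw [mxd]; exact mxr_nonneg _ _
    rcases h0.lt_or_eq with h | h
    · exact h
    · exfalso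
      have hall := allEq_of_mxd_zero N arr h.symm
      obtain ⟨k0, hk0, hk0v⟩ := hatt
      have h00 : arr.getD 0 0 = m0 := by rw [← hk0v, hall k0 hk0]
      have hconst : ∀ k, k < N.toNat → arr.getD k 0 = m0 := by
        intro k hk
        rw [hall k (by omega), h00]
      have hsum' : sumN N arr = (N.toNat : Int) * m0 :=
        sum_take_const arr N.toNat m0 (by omega) hconst
      rw [hsum', show ((N.toNat : Nat) : Int) = N by omega] at hsum
      exact lt_irrefl _ hsum
  obtain ⟨i, hi1, hi2, hi3, hscan⟩ := scanA_char_pos N arr hpos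
  have hdi : (diffs N arr).getD i 0 = arr.getD (i+1) 0 - arr.getD i 0 :=
    getD_diffs' N arr i (by omega)
  have hilen : i + 1 < arr.length := by omega
  have ha2 : (scanA N arr).2 = some ((i:Int), (i:Int)+1) := by rw [hscan]
  have eip : (i:Int) + 1 = ((i+1 : Nat) : Int) := by push_cast; ring
  -- A's step in Nat form
  have hstepA : stepA N arr =
      (if (diffs N arr).getD i 0 < 0 then arr.set i (arr.getD i 0 - 1)
       else arr.set (i+1) (arr.getD (i+1) 0 - 1)) := by
    rw [stepA, ha2]
    simp only
    rw [show (i:Int)+1-1 = ((i:Nat):Int) by ring, eip,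
        PySem.List.pyGetD_natCast, PySem.List.pyGetD_natCast,
        PySem.List.pySetD_natCast, PySem.List.pySetD_natCast]
    by_cases hsgn : (diffs N arr).getD i 0 < 0
    · rw [if_pos (show arr.getD i 0 > arr.getD (i+1) 0 by omega), if_pos hsgn]
    · rw [if_neg (show ¬ (arr.getD i 0 > arr.getD (i+1) 0) by omega), if_neg hsgn]
  -- the decremented position p and basic facts about it
  have habs : |(diffs N arr).getD i 0| = mxd (diffs N arr) := hi2
  have hchoose : ∃ p : Nat, stepA N arr = arr.set p (arr.getD p 0 - 1) ∧
      (p:Int) < N ∧ m0 + 1 ≤ arr.getD p 0 := by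
    by_cases hsgn : (diffs N arr).getD i 0 < 0
    · refine ⟨i, by rw [hstepA, if_pos hsgn], by omega, ?_⟩
      have := hlow (i+1) (by omega)
      omega
    · refine ⟨i+1, by rw [hstepA, if_neg hsgn], by omega, ?_⟩
      have hne : (diffs N arr).getD i 0 ≠ 0 := abs_pos.mp (by omega)
      have := hlow i (by omega)
      omega
  obtain ⟨p, hp, hpN, hpv⟩ := hchoose
  have hplen : p < arr.length := by omega
  refine ⟨?_, ?_, ?_, ?_, ?_⟩
  case refine_2 => rw [hp, List.length_set]
  case refine_3 =>
    intro k hk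
    rw [hp, getD_set _ _ _ _ hplen]
    split_ifs with h
    · omega
    · exact hlow k hk
  case refine_4 =>
    obtain ⟨k0, hk0, hk0v⟩ := hatt
    refine ⟨k0, hk0, ?_⟩
    rw [hp, getD_set _ _ _ _ hplen, if_neg (by intro h; rw [h] at hk0v; omega)]
    exact hk0v
  case refine_5 =>
    rw [hp, sumN, sumN, sum_take_set arr p N.toNat _ (by omega) hplen (by omega)]
    ring
  -- main component equality
  obtain ⟨bi, hfold, hfind⟩ := queryB_char (diffs N arr) w nb hw hnb0 (by rw [hn0]; exact hcov) hpos i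
    (by omega) hi2 hi3
  have hblt : ∀ b1 : Nat, b1 ≤ i → b1 / w.toNat < nb.toNat := by
    intro b1 hb1
    apply (Nat.div_lt_iff_lt_mul hw').mpr
    omega
  have hfd1 : PySem.Int.floordiv ((i:Nat):Int) w = (((i / w.toNat : Nat)):Int) := by
    conv_lhs => rw [show w = ((w.toNat : Nat):Int) by omega]
    exact PySem.Int.floordiv_natCast i w.toNat
  have hfd2 : PySem.Int.floordiv (((i-1:Nat)):Int) w = ((((i-1) / w.toNat : Nat)):Int) := by
    conv_lhs => rw [show w = ((w.toNat : Nat):Int) by omega]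
    exact PySem.Int.floordiv_natCast (i-1) w.toNat
  have hfd3 : PySem.Int.floordiv (((i+1:Nat)):Int) w = ((((i+1) / w.toNat : Nat)):Int) := by
    conv_lhs => rw [show w = ((w.toNat : Nat):Int) by omega]
    exact PySem.Int.floordiv_natCast (i+1) w.toNat
  have hfun : ∀ dnew : List Int, dnew.length = (N-1).toNat →
      (fun (bm' : List Int) (b : Int) => PySem.List.pySetD bm' b (blockMaxB dnew (N-1) w b))
        = (fun (bm' : List Int) (b : Int) => PySem.List.pySetD bm' b
            (blockMaxB dnew ((dnew.length : Nat) : Int) ((w.toNat : Nat) : Int) b)) := by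
    intro dnew hdlen
    funext bm' b
    conv_lhs => rw [show (N-1 : Int) = ((dnew.length : Nat):Int) by rw [hdlen]; omega,
      show w = ((w.toNat : Nat):Int) by omega]
  simp only [stepB, hfold, hfind]
  rw [pyGetD_int _ _ (by omega), Int.toNat_natCast]
  by_cases hsgn : (diffs N arr).getD i 0 < 0
  · rw [if_pos hsgn, hstepA, if_pos hsgn]
    by_cases hi0 : 0 < i
    · rw [if_pos (show ((i:Nat):Int) > 0 by exact_mod_cast hi0)]
      dsimp only
      rw [show ((i:Nat):Int) - 1 = (((i-1:Nat)):Int) by omega]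
      simp only [PySem.List.pySetD_natCast, PySem.List.pyGetD_natCast]
      rw [hfd1, hfd2, d2_eq_left N arr i hlen (by omega) hi0]
      simp only [Prod.mk.injEq]
      refine ⟨trivial, trivial, ?_⟩
      rw [hfun _ (length_diffs _ _)]
      apply bm_update _ _ _ _ hw' (by rw [length_diffs, length_diffs])
      · intro b hb
        by_cases hc : (((i-1) / w.toNat : Nat) : Int) ≠ ((i / w.toNat : Nat) : Int)
        · rw [if_pos hc] at hb
          rcases List.mem_cons.mp hb with h | h
          · exact ⟨i / w.toNat, h, hblt i (le_refl i)⟩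
          · exact ⟨(i-1) / w.toNat, by simpa using h, hblt (i-1) (by omega)⟩
        · rw [if_neg hc] at hb
          exact ⟨i / w.toNat, by simpa using hb, hblt i (le_refl i)⟩
      · intro k hk hne
        have hkI : (k:Int) < N - 1 := by rw [hn0] at hk; omega
        rw [getD_diffs_set N arr i (arr.getD i 0 - 1) (by omega) k hkI] at hne
        by_cases e1 : k + 1 = i
        · have hkv : k = i - 1 := by omega
          by_cases hc : (((i-1) / w.toNat : Nat) : Int) ≠ ((i / w.toNat : Nat) : Int)
          · rw [if_pos hc, hkv]
            exact List.mem_cons.mpr (Or.inr (by simp))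
          · rw [if_neg hc, hkv]
            have : (((i-1) / w.toNat : Nat) : Int) = ((i / w.toNat : Nat) : Int) := by omega
            rw [this]
            exact List.mem_cons_self
        · rw [if_neg e1] at hne
          by_cases e2 : k = i
          · rw [e2]
            split_ifs <;> exact List.mem_cons_self
          · rw [if_neg e2] at hne
            exact absurd rfl hne
    · have hz : i = 0 := by omega
      subst hz
      rw [if_neg (show ¬ (((0:Nat):Int) > 0) by simp)]
      dsimp only
      simp only [PySem.List.pySetD_natCast, PySem.List.pyGetD_natCast]
      rw [hfd1, d1_eq_left0 N arr hlen (by omega)]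
      simp only [Prod.mk.injEq]
      refine ⟨trivial, trivial, ?_⟩
      rw [hfun _ (length_diffs _ _)]
      apply bm_update _ _ _ _ hw' (by rw [length_diffs, length_diffs])
      · intro b hb
        exact ⟨0 / w.toNat, by simpa using hb, hblt 0 (by omega)⟩
      · intro k hk hne
        have hkI : (k:Int) < N - 1 := by rw [hn0] at hk; omega
        rw [getD_diffs_set N arr 0 (arr.getD 0 0 - 1) (by omega) k hkI] at hne
        rw [if_neg (show ¬ (k + 1 = 0) by omega)] at hne
        by_cases e2 : k = 0
        · rw [e2]
          simp
        · rw [if_neg e2] at hne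
          exact absurd rfl hne
  · rw [if_neg hsgn, hstepA, if_neg hsgn]
    rw [eip]
    by_cases hiend : i + 1 < (N-1).toNat
    · rw [if_pos (show (((i+1:Nat)):Int) < N - 1 by omega)]
      dsimp only
      simp only [PySem.List.pySetD_natCast, PySem.List.pyGetD_natCast]
      rw [hfd1, hfd3, d2_eq_right N arr i hlen (by omega) hiend]
      simp only [Prod.mk.injEq]
      refine ⟨trivial, trivial, ?_⟩
      rw [hfun _ (length_diffs _ _)]
      apply bm_update _ _ _ _ hw' (by rw [length_diffs, length_diffs])
      · intro b hb
        by_cases hc : (((i+1) / w.toNat : Nat) : Int) ≠ ((i / w.toNat : Nat) : Int)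
        · rw [if_pos hc] at hb
          rcases List.mem_cons.mp hb with h | h
          · exact ⟨i / w.toNat, h, hblt i (le_refl i)⟩
          · exact ⟨(i+1) / w.toNat, by simpa using h, by
              apply (Nat.div_lt_iff_lt_mul hw').mpr
              omega⟩
        · rw [if_neg hc] at hb
          exact ⟨i / w.toNat, by simpa using hb, hblt i (le_refl i)⟩
      · intro k hk hne
        have hkI : (k:Int) < N - 1 := by rw [hn0] at hk; omega
        rw [getD_diffs_set N arr (i+1) (arr.getD (i+1) 0 - 1) (by omega) k hkI] at hne
        by_cases e1 : k + 1 = i + 1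
        · have hkv : k = i := by omega
          rw [hkv]
          split_ifs <;> exact List.mem_cons_self
        · rw [if_neg e1] at hne
          by_cases e2 : k = i + 1
          · rw [e2]
            by_cases hc : (((i+1) / w.toNat : Nat) : Int) ≠ ((i / w.toNat : Nat) : Int)
            · rw [if_pos hc]
              exact List.mem_cons.mpr (Or.inr (by simp))
            · rw [if_neg hc]
              have : (((i+1) / w.toNat : Nat) : Int) = ((i / w.toNat : Nat) : Int) := by omega
              rw [this]
              exact List.mem_cons_self
          · rw [if_neg e2] at hne
            exact absurd rfl hne
    · rw [if_neg (show ¬ ((((i+1:Nat)):Int) < N - 1) by omega)]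
      dsimp only
      simp only [PySem.List.pySetD_natCast, PySem.List.pyGetD_natCast]
      rw [hfd1, d1_eq_rightEnd N arr i hlen (by omega) hiend]
      simp only [Prod.mk.injEq]
      refine ⟨trivial, trivial, ?_⟩
      rw [hfun _ (length_diffs _ _)]
      apply bm_update _ _ _ _ hw' (by rw [length_diffs, length_diffs])
      · intro b hb
        exact ⟨i / w.toNat, by simpa using hb, hblt i (le_refl i)⟩
      · intro k hk hne
        have hkI : (k:Int) < N - 1 := by rw [hn0] at hk; omega
        rw [getD_diffs_set N arr (i+1) (arr.getD (i+1) 0 - 1) (by omega) k hkI] at hne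
        by_cases e1 : k + 1 = i + 1
        · have hkv : k = i := by omega
          rw [hkv]
          simp
        · rw [if_neg e1] at hne
          rw [if_neg (show ¬ (k = i+1) by rw [hn0] at hk; omega)] at hne
          exact absurd rfl hne

lemma iter_main (N w nb m0 : Int)
    (hN : 2 ≤ N) (hw : 1 ≤ w) (hnb0 : 0 ≤ nb)
    (hcov : (N-1).toNat ≤ nb.toNat * w.toNat) :
    ∀ (t : Nat) (arr : List Int), N ≤ (arr.length : Int) →
    (∀ k : Nat, (k:Int) < N → m0 ≤ arr.getD k 0) →
    (∃ k : Nat, (k:Int) < N ∧ arr.getD k 0 = m0) →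
    ((t:Int) ≤ sumN N arr - N * m0) →
    (fun st => stepB (N-1) w nb st)^[t] (arr, diffs N arr, bmList (diffs N arr) w.toNat nb.toNat)
      = ((fun a => stepA N a)^[t] arr,
         diffs N ((fun a => stepA N a)^[t] arr),
         bmList (diffs N ((fun a => stepA N a)^[t] arr)) w.toNat nb.toNat) := by
  intro t
  induction t with
  | zero => intro arr _ _ _ _; rfl
  | succ t ih =>
      intro arr hlen hlow hatt ht
      have ht1 : N * m0 < sumN N arr := by
        have h2 : ((t+1 : Nat) : Int) ≤ sumN N arr - N * m0 := ht
        push_cast at h2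
        omega
      obtain ⟨hstep, hlen2, hlow2, hatt2, hsum2⟩ :=
        step_main N w nb m0 arr hN hlen hw hnb0 hcov hlow hatt ht1
      simp only [Function.iterate_succ_apply]
      rw [hstep]
      apply ih (stepA N arr) (by rw [hlen2]; exact hlen) hlow2 hatt2
      rw [hsum2]
      have h2 : ((t+1 : Nat) : Int) ≤ sumN N arr - N * m0 := ht
      push_cast at h2 ⊢
      omega

-- ===== VERDICT =====
theorem solve_spec : Claim_equal_solve := by
  intro N T arr _ hPre
  show solve N T arr = solve_alt N T arr
  by_cases hT : T ≤ 0
  · rw [solve, solve_alt, if_neg (by omega), PySem.List.pyRange_one_eq_nil hT]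
    rfl
  · rcases hPre with h | ⟨hN, hlen, hS⟩
    · exact absurd h hT
    have hT2 : T > 0 := by omega
    have htlen : (arr.take N.toNat).length = N.toNat := by
      simp
      omega
    obtain ⟨m, hm⟩ : ∃ m, (arr.take N.toNat).min? = some m := by
      cases hmin : (arr.take N.toNat).min? with
      | none =>
          exfalso
          have hnil := List.min?_eq_none_iff.mp hmin
          rw [hnil] at htlen
          simp at htlen
          omega
      | some m => exact ⟨m, rfl⟩
    obtain ⟨hmmem, hmle⟩ := List.min?_eq_some_iff.mp hm
    have hm0 : (arr.take N.toNat).min?.getD 0 = m := by rw [hm]; rfl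
    have hlow : ∀ k : Nat, (k:Int) < N → m ≤ arr.getD k 0 := by
      intro k hk
      have hkt : k < N.toNat := by omega
      have hmem : arr.getD k 0 ∈ arr.take N.toNat := by
        rw [← getD_take arr N.toNat k hkt, List.getD_eq_getElem _ _ (by omega)]
        exact List.getElem_mem _
      exact hmle _ hmem
    have hatt : ∃ k : Nat, (k:Int) < N ∧ arr.getD k 0 = m := by
      obtain ⟨k, hk, hkv⟩ := List.mem_iff_getElem.mp hmmem
      refine ⟨k, by omega, ?_⟩
      rw [← hkv, ← List.getD_eq_getElem _ 0 hk, getD_take arr N.toNat k (by omega)]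
    have hw : 1 ≤ wloopB (N-1) 1 := wloopB_ge (N-1) (N-1-1).toNat 1 rfl
    set w := wloopB (N-1) 1 with hwdef
    set nb := PySem.Int.floordiv (N - 1 + w - 1) w with hnbdef
    have hnb0 : 0 ≤ nb := by
      rw [hnbdef, PySem.Int.le_floordiv_iff_mul_le (by omega)]
      omega
    have hnbw : N - 1 ≤ nb * w := by
      have h1 : PySem.Int.floordiv (N-1+w-1) w < nb + 1 := by omega
      rw [PySem.Int.floordiv_lt_iff_lt_mul (by omega)] at h1
      rw [add_mul, one_mul] at h1
      omega
    have hcov : (N-1).toNat ≤ nb.toNat * w.toNat := by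
      have hc : ((nb.toNat * w.toNat : Nat) : Int) = nb * w := by
        push_cast
        rw [Int.toNat_of_nonneg hnb0, Int.toNat_of_nonneg (by omega)]
      omega
    have hd0 : (PySem.List.pyRange 0 (N-1) 1).map
        (fun k => PySem.List.pyGetD arr (k+1) 0 - PySem.List.pyGetD arr k 0) = diffs N arr := by
      rw [diffs, PySem.List.pyRange_one, PySem.List.pyRange_one, List.map_map, List.map_map,
        show (N - 1 - 0).toNat = (N-1).toNat by omega]
      apply List.map_congr_left
      intro k _
      simp only [Function.comp]
      rw [show (0:Int) + (k:Int) + 1 = 1 + (k:Int) by ring,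
        show (0:Int) + (k:Int) = 1 + (k:Int) - 1 by ring]
    have hbm0 : (PySem.List.pyRange 0 nb 1).map (fun b => blockMaxB (diffs N arr) (N-1) w b)
        = bmList (diffs N arr) w.toNat nb.toNat := by
      rw [bmList, PySem.List.pyRange_one, List.map_map,
        show (nb - 0).toNat = nb.toNat by omega]
      apply List.map_congr_left
      intro b _
      simp only [Function.comp]
      rw [show (0:Int) + (b:Int) = ((b:Nat):Int) by ring]
      conv_lhs => rw [show (N-1:Int) = (((diffs N arr).length : Nat):Int) by rw [length_diffs]; omega,
        show w = ((w.toNat : Nat):Int) by omega]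
      exact blockMaxB_eq_segMx (diffs N arr) w.toNat b
    rw [solve, solve_alt, if_pos hT2]
    simp only
    rw [hd0, hbm0, foldl_const_iterate (fun a => stepA N a),
      foldl_const_iterate (fun st => stepB (N-1) w nb st),
      PySem.List.length_pyRange_one,
      show (T - 0).toNat = T.toNat by omega]
    rw [iter_main N w nb m hN hw hnb0 hcov T.toNat arr hlen hlow hatt
      (by rw [show ((T.toNat : Nat) : Int) = T by omega, sumN]; rw [hm0] at hS; omega)]
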